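-- pv_equiv track=rewrite | github.com/colin0brass/geo_gedcom | statistics/collectors/divorce.py | _categorize_durations
-- ===== SOURCE A (Python) =====
-- from typing import Any, Iterable, Optional, Dict, List
--
-- def _categorize_durations(durations: List[int]) -> Dict[str, int]:
--     """Categorize marriage durations into ranges."""
--     ranges = {
--         'Less than 1 year': 0,
--         '1-5 years': 0,
--         '6-10 years': 0,
--         '11-20 years': 0,
--         '21-30 years': 0,
--         '31+ years': 0
--     }
--
--     for duration in durations:
--         if duration < 1:
--             ranges['Less than 1 year'] += 1
--         elif duration <= 5:
--             ranges['1-5 years'] += 1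
--         elif duration <= 10:
--             ranges['6-10 years'] += 1
--         elif duration <= 20:
--             ranges['11-20 years'] += 1
--         elif duration <= 30:
--             ranges['21-30 years'] += 1
--         else:
--             ranges['31+ years'] += 1
--
--     return ranges
-- ===== SOURCE B (Python) =====
-- from typing import Any, Iterable, Optional, Dict, List
--
-- def _categorize_durations(durations: List[int]) -> Dict[str, int]:
--     """Categorize marriage durations: count how many fall below each boundary
--     (cumulative cut counts), then take adjacent differences — no per-element bucketing."""
--     labels = ['Less than 1 year', '1-5 years', '6-10 years',
--               '11-20 years', '21-30 years', '31+ years']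
--     cuts = [0] + [sum(d < b for d in durations) for b in (1, 6, 11, 21, 31)] + [len(durations)]
--     return {lab: cuts[i + 1] - cuts[i] for i, lab in enumerate(labels)}
-- ===== Notes on version B (the rewrite author's own statement) =====
-- stated objective: alternative
-- what changed: Instead of bucketing each duration with a six-way if/elif chain into a pre-built dict, B computes five cumulative cut counts (how many durations fall below each boundary) in staged passes and obtains each bucket as the difference of adjacent cuts, assembling the dict once at the end.
import Mathlib
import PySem

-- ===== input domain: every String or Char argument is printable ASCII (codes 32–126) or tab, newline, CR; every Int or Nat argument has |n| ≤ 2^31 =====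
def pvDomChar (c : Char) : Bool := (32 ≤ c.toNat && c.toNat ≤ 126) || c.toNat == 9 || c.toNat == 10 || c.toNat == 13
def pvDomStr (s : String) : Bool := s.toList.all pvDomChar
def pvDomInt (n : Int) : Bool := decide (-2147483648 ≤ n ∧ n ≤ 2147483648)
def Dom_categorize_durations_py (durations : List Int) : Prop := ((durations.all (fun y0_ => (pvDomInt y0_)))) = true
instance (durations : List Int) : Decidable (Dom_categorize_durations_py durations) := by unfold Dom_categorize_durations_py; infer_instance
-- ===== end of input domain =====

-- B replaces A's per-element six-way if/elif bucketing by cumulative boundary cut counts and adjacent differencing (alternative, same cost).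

-- ===== PORT A =====
def categorize_durations_py (durations : List Int) : List (String × Int) :=
  let ranges0 : PySem.Dict String Int := PySem.Dict.ofList
    [("Less than 1 year", 0), ("1-5 years", 0), ("6-10 years", 0),
     ("11-20 years", 0), ("21-30 years", 0), ("31+ years", 0)]
  let ranges := durations.foldl (fun r duration =>
    if duration < 1 then r.modify "Less than 1 year" 0 (· + 1)
    else if duration ≤ 5 then r.modify "1-5 years" 0 (· + 1)
    else if duration ≤ 10 then r.modify "6-10 years" 0 (· + 1)
    else if duration ≤ 20 then r.modify "11-20 years" 0 (· + 1)
    else if duration ≤ 30 then r.modify "21-30 years" 0 (· + 1)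
    else r.modify "31+ years" 0 (· + 1)) ranges0
  ranges.items

-- ===== PORT B =====
-- cuts has 7 entries and the comprehension indexes cuts[0..6], so pyGetD's default is never used.
def categorize_durations_py_alt (durations : List Int) : List (String × Int) :=
  let labels : List String := ["Less than 1 year", "1-5 years", "6-10 years",
                               "11-20 years", "21-30 years", "31+ years"]
  let cuts : List Int :=
    [0] ++ (([1, 6, 11, 21, 31] : List Int).map (fun b =>
      (durations.map (fun d => if d < b then (1 : Int) else 0)).sum)) ++ [(durations.length : Int)]
  (PySem.Dict.ofList ((PySem.List.enumerate labels).map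
      (fun p => (p.2, PySem.List.pyGetD cuts (p.1 + 1) 0 - PySem.List.pyGetD cuts p.1 0)))).items

-- ===== PRECONDITION & SPEC =====
def Spec_categorize_durations_py (durations : List Int) (out : List (String × Int)) : Prop := out = categorize_durations_py_alt durations
instance (durations : List Int) (out : List (String × Int)) : Decidable (Spec_categorize_durations_py durations out) := by unfold Spec_categorize_durations_py; infer_instance

-- ===== CLAIM (what is proved, stated in full; the proofs are below) =====
def Claim_equal_categorize_durations_py : Prop := ∀ (durations : List Int), Dom_categorize_durations_py durations → Spec_categorize_durations_py durations (categorize_durations_py durations)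

-- ===== LEMMAS AND PROOFS =====

-- A's dict state with the six fixed keys and arbitrary values
def pvD (c0 c1 c2 c3 c4 c5 : Int) : PySem.Dict String Int := PySem.Dict.ofList
  [("Less than 1 year", c0), ("1-5 years", c1), ("6-10 years", c2),
   ("11-20 years", c3), ("21-30 years", c4), ("31+ years", c5)]

def pvStepA (r : PySem.Dict String Int) (duration : Int) : PySem.Dict String Int :=
  if duration < 1 then r.modify "Less than 1 year" 0 (· + 1)
  else if duration ≤ 5 then r.modify "1-5 years" 0 (· + 1)
  else if duration ≤ 10 then r.modify "6-10 years" 0 (· + 1)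
  else if duration ≤ 20 then r.modify "11-20 years" 0 (· + 1)
  else if duration ≤ 30 then r.modify "21-30 years" 0 (· + 1)
  else r.modify "31+ years" 0 (· + 1)

-- number of elements of ds below b
def pvCnt (b : Int) (ds : List Int) : Int := (ds.map (fun d => if d < b then (1 : Int) else 0)).sum

lemma pvCnt_cons (b d : Int) (ds : List Int) :
    pvCnt b (d :: ds) = (if d < b then (1 : Int) else 0) + pvCnt b ds := by
  simp [pvCnt]

-- A's fold, with arbitrary starting counts, expressed through cumulative cut counts
lemma pv_foldA (ds : List Int) : ∀ (c0 c1 c2 c3 c4 c5 : Int),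
    (ds.foldl pvStepA (pvD c0 c1 c2 c3 c4 c5)).items =
      [("Less than 1 year", c0 + pvCnt 1 ds),
       ("1-5 years", c1 + (pvCnt 6 ds - pvCnt 1 ds)),
       ("6-10 years", c2 + (pvCnt 11 ds - pvCnt 6 ds)),
       ("11-20 years", c3 + (pvCnt 21 ds - pvCnt 11 ds)),
       ("21-30 years", c4 + (pvCnt 31 ds - pvCnt 21 ds)),
       ("31+ years", c5 + ((ds.length : Int) - pvCnt 31 ds))] := by
  induction ds with
  | nil =>
    intro c0 c1 c2 c3 c4 c5
    simp [pvCnt, pvD]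
    rfl
  | cons d ds ih =>
    intro c0 c1 c2 c3 c4 c5
    simp only [List.foldl_cons]
    have step : ∀ (e0 e1 e2 e3 e4 e5 : Int),
        pvStepA (pvD c0 c1 c2 c3 c4 c5) d = pvD e0 e1 e2 e3 e4 e5 →
        (List.foldl pvStepA (pvStepA (pvD c0 c1 c2 c3 c4 c5) d) ds).items =
          [("Less than 1 year", e0 + pvCnt 1 ds),
           ("1-5 years", e1 + (pvCnt 6 ds - pvCnt 1 ds)),
           ("6-10 years", e2 + (pvCnt 11 ds - pvCnt 6 ds)),
           ("11-20 years", e3 + (pvCnt 21 ds - pvCnt 11 ds)),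
           ("21-30 years", e4 + (pvCnt 31 ds - pvCnt 21 ds)),
           ("31+ years", e5 + ((ds.length : Int) - pvCnt 31 ds))] := by
      intro e0 e1 e2 e3 e4 e5 h; rw [h]; exact ih e0 e1 e2 e3 e4 e5
    by_cases h1 : d < 1
    · rw [step (c0 + 1) c1 c2 c3 c4 c5 (by simp only [pvStepA, if_pos h1]; rfl)]
      simp only [pvCnt_cons, List.length_cons, List.cons.injEq, Prod.mk.injEq, true_and, and_true]
      rw [if_pos (by omega : d < 1), if_pos (by omega : d < 6), if_pos (by omega : d < 11), if_pos (by omega : d < 21), if_pos (by omega : d < 31)]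
      push_cast; omega
    · by_cases h2 : d ≤ 5
      · rw [step c0 (c1 + 1) c2 c3 c4 c5 (by simp only [pvStepA, if_neg h1, if_pos h2]; rfl)]
        simp only [pvCnt_cons, List.length_cons, List.cons.injEq, Prod.mk.injEq, true_and, and_true]
        rw [if_neg (by omega : ¬ d < 1), if_pos (by omega : d < 6), if_pos (by omega : d < 11), if_pos (by omega : d < 21), if_pos (by omega : d < 31)]
        push_cast; omega
      · by_cases h3 : d ≤ 10
        · rw [step c0 c1 (c2 + 1) c3 c4 c5 (by simp only [pvStepA, if_neg h1, if_neg h2, if_pos h3]; rfl)]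
          simp only [pvCnt_cons, List.length_cons, List.cons.injEq, Prod.mk.injEq, true_and, and_true]
          rw [if_neg (by omega : ¬ d < 1), if_neg (by omega : ¬ d < 6), if_pos (by omega : d < 11), if_pos (by omega : d < 21), if_pos (by omega : d < 31)]
          push_cast; omega
        · by_cases h4 : d ≤ 20
          · rw [step c0 c1 c2 (c3 + 1) c4 c5 (by simp only [pvStepA, if_neg h1, if_neg h2, if_neg h3, if_pos h4]; rfl)]
            simp only [pvCnt_cons, List.length_cons, List.cons.injEq, Prod.mk.injEq, true_and, and_true]
            rw [if_neg (by omega : ¬ d < 1), if_neg (by omega : ¬ d < 6), if_neg (by omega : ¬ d < 11), if_pos (by omega : d < 21), if_pos (by omega : d < 31)]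
            push_cast; omega
          · by_cases h5 : d ≤ 30
            · rw [step c0 c1 c2 c3 (c4 + 1) c5 (by simp only [pvStepA, if_neg h1, if_neg h2, if_neg h3, if_neg h4, if_pos h5]; rfl)]
              simp only [pvCnt_cons, List.length_cons, List.cons.injEq, Prod.mk.injEq, true_and, and_true]
              rw [if_neg (by omega : ¬ d < 1), if_neg (by omega : ¬ d < 6), if_neg (by omega : ¬ d < 11), if_neg (by omega : ¬ d < 21), if_pos (by omega : d < 31)]
              push_cast; omega
            · rw [step c0 c1 c2 c3 c4 (c5 + 1) (by simp only [pvStepA, if_neg h1, if_neg h2, if_neg h3, if_neg h4, if_neg h5]; rfl)]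
              simp only [pvCnt_cons, List.length_cons, List.cons.injEq, Prod.mk.injEq, true_and, and_true]
              rw [if_neg (by omega : ¬ d < 1), if_neg (by omega : ¬ d < 6), if_neg (by omega : ¬ d < 11), if_neg (by omega : ¬ d < 21), if_neg (by omega : ¬ d < 31)]
              push_cast; omega

-- B reduced to the same explicit list
lemma pv_altB (ds : List Int) :
    categorize_durations_py_alt ds =
      [("Less than 1 year", (0 : Int) + pvCnt 1 ds),
       ("1-5 years", 0 + (pvCnt 6 ds - pvCnt 1 ds)),
       ("6-10 years", 0 + (pvCnt 11 ds - pvCnt 6 ds)),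
       ("11-20 years", 0 + (pvCnt 21 ds - pvCnt 11 ds)),
       ("21-30 years", 0 + (pvCnt 31 ds - pvCnt 21 ds)),
       ("31+ years", 0 + ((ds.length : Int) - pvCnt 31 ds))] := by
  simp only [categorize_durations_py_alt, pvCnt]
  simp [PySem.List.enumerate, PySem.Dict.ofList, PySem.List.pyGetD,
        PySem.Dict.update, PySem.Dict.empty, PySem.Dict.insert, PySem.Dict.contains]

-- ===== VERDICT (by name: the statement is the Claim_ definition above) =====
theorem categorize_durations_py_spec : Claim_equal_categorize_durations_py := by
  intro ds _
  unfold Spec_categorize_durations_py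
  rw [pv_altB]
  exact pv_foldA ds 0 0 0 0 0 0
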